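-- pv_equiv track=rewrite | github.com/supranational/vdf-fpga | primitives/model/primitives.py | compressor_tree
-- ===== SOURCE A (Python) =====
-- def fa(A, B, Cin):
--    S    = A ^ B ^ Cin
--    Cout = (A & B) | (Cin & (A ^B))
--    return Cout, S
--
-- def csa(A, B, Cin, bit_len):
--    Cout = bit_len*[0]
--    S    = bit_len*[0]
--    for i in range(bit_len):
--       Cout[i], S[i] = fa(A[i], B[i], Cin[i])
--    return Cout, S
--
-- def csa_level(terms, bit_len):
--    num_results  = len(terms)//3
--
--    result_terms = []
--
--    # Feed three consecutive terms to a CSA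
--    for i in range(2, len(terms), 3):
--       cout, s  = csa(terms[i-2], terms[i-1], terms[i], bit_len)
--       # Need to shift carry 1 bit
--       cout.insert(0,0)
--       s.append(0)
--       result_terms.append(cout)
--       result_terms.append(s)
--
--    # Push any leftover terms not feed to a CSA to the next level
--    for i in range(len(terms)%3):
--       temp_term = terms[(len(terms)-1)-i]
--       temp_term.append(0)
--       result_terms.append(temp_term)
--
--    return result_terms
--
-- def compressor_tree(terms, bit_len):
--    if (len(terms) == 3):
--       cout, s          = csa(terms[0], terms[1], terms[2], bit_len)
--       cout.insert(0,0)
--       s.append(0)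
--    else:
--       next_level_terms = csa_level(terms, bit_len)
--       cout, s          = compressor_tree(next_level_terms, bit_len+1)
--
--    return cout, s
-- ===== SOURCE B (Python) =====
-- # B: one self-contained iterative loop — levels reduced by destructuring the
-- # worklist three terms at a time (no index arithmetic, no fa/csa/csa_level
-- # helpers), the carry list born pre-shifted with its leading 0.
-- # B does not mutate the input term lists (A appends to leftover terms in place).
-- def compressor_tree(terms, bit_len):
--     while len(terms) != 3:
--         nxt = []
--         work = terms
--         while len(work) >= 3:
--             a, b, c, work = work[0], work[1], work[2], work[3:]
--             cout, s = [0], []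
--             for i in range(bit_len):
--                 x, y, z = a[i], b[i], c[i]
--                 cout.append((x & y) | (z & (x ^ y)))
--                 s.append(x ^ y ^ z)
--             s.append(0)
--             nxt.append(cout)
--             nxt.append(s)
--         for t in reversed(work):
--             nxt.append(t + [0])
--         terms = nxt
--         bit_len += 1
--     a, b, c = terms
--     cout, s = [0], []
--     for i in range(bit_len):
--         x, y, z = a[i], b[i], c[i]
--         cout.append((x & y) | (z & (x ^ y)))
--         s.append(x ^ y ^ z)
--     s.append(0)
--     return cout, s
-- ===== Notes on version B (the rewrite author's own statement) =====
-- stated objective: alternative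
-- what changed: A's recursive compressor_tree over index-driven helpers (csa_level walks range(2,len,3) with terms[i-2..i], leftovers via len%3 index arithmetic, csa preallocates and writes by index) is replaced by one self-contained iterative while-loop that destructures the worklist three terms at a time, builds the carry list pre-shifted, pushes leftovers from the reversed tail, and does not mutate the input lists.
import Mathlib
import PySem

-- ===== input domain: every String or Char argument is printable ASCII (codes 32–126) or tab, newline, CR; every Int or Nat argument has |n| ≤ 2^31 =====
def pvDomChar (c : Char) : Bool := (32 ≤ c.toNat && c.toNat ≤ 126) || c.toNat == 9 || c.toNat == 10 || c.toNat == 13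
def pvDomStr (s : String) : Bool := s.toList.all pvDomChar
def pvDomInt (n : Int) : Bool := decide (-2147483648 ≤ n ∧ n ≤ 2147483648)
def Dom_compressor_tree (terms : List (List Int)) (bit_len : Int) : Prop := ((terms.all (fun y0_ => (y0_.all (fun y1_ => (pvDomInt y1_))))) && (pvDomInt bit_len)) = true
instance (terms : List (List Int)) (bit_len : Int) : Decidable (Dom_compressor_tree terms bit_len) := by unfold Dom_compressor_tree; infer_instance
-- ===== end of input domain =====

-- B replaces A's recursive descent through index-driven CSA levels by one iterative
-- loop that destructures the worklist three terms at a time (no fa/csa/csa_level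
-- helpers, no index arithmetic, carry list born pre-shifted); return values equal.
-- A mutates the inner term lists in place (insert/append); B does not — the
-- equivalence proved here is about the RETURN value only.

-- ===== PORT A =====
-- fa(A,B,Cin): full adder on Python ints (bitwise, exact on negatives via PySem)
def fa (A B Cin : Int) : Int × Int :=
  let S := PySem.Int.bxor (PySem.Int.bxor A B) Cin
  let Cout := PySem.Int.bor (PySem.Int.band A B) (PySem.Int.band Cin (PySem.Int.bxor A B))
  (Cout, S)

-- csa: Python preallocates Cout/S of length bit_len and writes index i at step i,
-- in order; built here by appending the same values in the same order (exact).
def csa (A B Cin : List Int) (bit_len : Int) : List Int × List Int :=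
  (PySem.List.pyRange 0 bit_len 1).foldl
    (fun acc i =>
      let cs := fa (PySem.List.pyGetD A i 0) (PySem.List.pyGetD B i 0) (PySem.List.pyGetD Cin i 0)
      (acc.1 ++ [cs.1], acc.2 ++ [cs.2]))
    ([], [])

def csa_level (terms : List (List Int)) (bit_len : Int) : List (List Int) :=
  let result :=
    (PySem.List.pyRange 2 (terms.length : Int) 3).foldl
      (fun acc i =>
        let cs := csa (PySem.List.pyGetD terms (i-2) []) (PySem.List.pyGetD terms (i-1) [])
                      (PySem.List.pyGetD terms i []) bit_len
        (acc ++ [0 :: cs.1]) ++ [cs.2 ++ [0]])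
      []
  (PySem.List.pyRange 0 (PySem.Int.mod (terms.length : Int) 3) 1).foldl
    (fun acc i => acc ++ [PySem.List.pyGetD terms (((terms.length : Int) - 1) - i) [] ++ [0]])
    result

-- the Python tail 'cout, s = csa(terms[0],terms[1],terms[2],b); cout.insert(0,0); s.append(0)'
def ctBase (terms : List (List Int)) (bit_len : Int) : List Int × List Int :=
  let cs := csa (PySem.List.pyGetD terms 0 []) (PySem.List.pyGetD terms 1 [])
                (PySem.List.pyGetD terms 2 []) bit_len
  (0 :: cs.1, cs.2 ++ [0])

-- A's recursion, with a fuel counter; fuel terms.length+1 suffices on Pre_ (the level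
-- size strictly decreases while ≥ 4); fuel 0 is reached only where the Python raises.
def compressor_tree_go (fuel : Nat) (terms : List (List Int)) (bit_len : Int) : List Int × List Int :=
  match fuel with
  | 0 => ctBase terms bit_len
  | fuel + 1 =>
    if terms.length = 3 then
      ctBase terms bit_len
    else
      compressor_tree_go fuel (csa_level terms bit_len) (bit_len + 1)

def compressor_tree (terms : List (List Int)) (bit_len : Int) : List Int × List Int :=
  compressor_tree_go (terms.length + 1) terms bit_len

-- ===== PORT B =====
-- B's fused per-triple bit loop: cout starts as [0] (pre-shifted), s gets its
-- trailing 0 after the loop; same three pyGetD reads per bit as the Python B.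
def ctbit (A B Cin : List Int) (bit_len : Int) : List Int × List Int :=
  let st := (PySem.List.pyRange 0 bit_len 1).foldl
    (fun acc i =>
      let x := PySem.List.pyGetD A i 0
      let y := PySem.List.pyGetD B i 0
      let z := PySem.List.pyGetD Cin i 0
      (acc.1 ++ [PySem.Int.bor (PySem.Int.band x y) (PySem.Int.band z (PySem.Int.bxor x y))],
       acc.2 ++ [PySem.Int.bxor (PySem.Int.bxor x y) z]))
    ([0], [])
  (st.1, st.2 ++ [0])

-- B's inner while: destructure the worklist three at a time; leftovers (< 3) are
-- pushed reversed with a 0 appended, as 'for t in reversed(work): nxt.append(t+[0])'.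
def levelB (bit_len : Int) : List (List Int) → List (List Int) → List (List Int)
  | a :: b :: c :: rest, nxt =>
      let cs := ctbit a b c bit_len
      levelB bit_len rest ((nxt ++ [cs.1]) ++ [cs.2])
  | work, nxt => nxt ++ work.reverse.map (fun t => t ++ [0])

-- B's outer while, with fuel; fuel terms.length suffices on Pre_.
def loopB : Nat → List (List Int) → Int → List (List Int) × Int
  | 0, terms, b => (terms, b)
  | fuel + 1, terms, b =>
      if terms.length ≠ 3 then loopB fuel (levelB b terms []) (b + 1) else (terms, b)

-- final 'a, b, c = terms': the unpack raises unless exactly 3 terms; unreached under Pre_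
def tailB (st : List (List Int) × Int) : List Int × List Int :=
  match st.1 with
  | a :: b :: c :: _ => ctbit a b c st.2
  | _ => ([], [])

def compressor_tree_alt (terms : List (List Int)) (bit_len : Int) : List Int × List Int :=
  tailB (loopB terms.length terms bit_len)

-- ===== PRECONDITION & SPEC =====
-- Pre_ is exactly where the Python A returns: fewer than 3 terms → the level size
-- never reaches 3 (RecursionError; B's while-loop would not terminate either), and a
-- term shorter than bit_len → IndexError at the level where it is consumed (every
-- term is consumed eventually; for bit_len ≤ 0 the condition is vacuous, as in A).
def Pre_compressor_tree (terms : List (List Int)) (bit_len : Int) : Prop :=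
  3 ≤ terms.length ∧ ∀ t ∈ terms, bit_len ≤ (t.length : Int)
instance (terms : List (List Int)) (bit_len : Int) : Decidable (Pre_compressor_tree terms bit_len) := by
  unfold Pre_compressor_tree; infer_instance

def pvWitness_compressor_tree : List (List Int) × Int := ([[1, 0], [0, 1], [1, 1]], 2)

def Spec_compressor_tree (terms : List (List Int)) (bit_len : Int) (out : List Int × List Int) : Prop := out = compressor_tree_alt terms bit_len
instance (terms : List (List Int)) (bit_len : Int) (out : List Int × List Int) : Decidable (Spec_compressor_tree terms bit_len out) := by unfold Spec_compressor_tree; infer_instance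

-- ===== CLAIM =====
def Claim_equal_compressor_tree : Prop := ∀ (terms : List (List Int)) (bit_len : Int), Dom_compressor_tree terms bit_len → Pre_compressor_tree terms bit_len → Spec_compressor_tree terms bit_len (compressor_tree terms bit_len)

-- ===== LEMMAS AND PROOFS =====

-- A's csa with the shift/pad applied is B's fused bit loop.
theorem csa_shift (A B Cin : List Int) (bl : Int) :
    ctbit A B Cin bl = (0 :: (csa A B Cin bl).1, (csa A B Cin bl).2 ++ [0]) := by
  unfold ctbit csa fa
  rw [PySem.List.foldl_prod_mk
        (f := fun l (i : Int) => l ++ [PySem.Int.bor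
            (PySem.Int.band (PySem.List.pyGetD A i 0) (PySem.List.pyGetD B i 0))
            (PySem.Int.band (PySem.List.pyGetD Cin i 0)
              (PySem.Int.bxor (PySem.List.pyGetD A i 0) (PySem.List.pyGetD B i 0)))])
        (g := fun l (i : Int) => l ++ [PySem.Int.bxor
            (PySem.Int.bxor (PySem.List.pyGetD A i 0) (PySem.List.pyGetD B i 0))
            (PySem.List.pyGetD Cin i 0)]),
      PySem.List.foldl_prod_mk
        (f := fun l (i : Int) => l ++ [PySem.Int.bor
            (PySem.Int.band (PySem.List.pyGetD A i 0) (PySem.List.pyGetD B i 0))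
            (PySem.Int.band (PySem.List.pyGetD Cin i 0)
              (PySem.Int.bxor (PySem.List.pyGetD A i 0) (PySem.List.pyGetD B i 0)))])
        (g := fun l (i : Int) => l ++ [PySem.Int.bxor
            (PySem.Int.bxor (PySem.List.pyGetD A i 0) (PySem.List.pyGetD B i 0))
            (PySem.List.pyGetD Cin i 0)])]
  simp

-- for a 3-element level, A's tail equals B's tail
theorem ctBase_eq_tailB (terms : List (List Int)) (b : Int) (h : terms.length = 3) :
    ctBase terms b = tailB (terms, b) := by
  match terms, h with
  | [x, y, z], _ =>
    simp [ctBase, tailB, csa_shift, PySem.List.pyGetD_ofNat']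

-- A's csa_level with the accumulator generalized
def levelA_go (terms : List (List Int)) (bit_len : Int) (acc : List (List Int)) : List (List Int) :=
  let result :=
    (PySem.List.pyRange 2 (terms.length : Int) 3).foldl
      (fun acc1 i =>
        let cs := csa (PySem.List.pyGetD terms (i-2) []) (PySem.List.pyGetD terms (i-1) [])
                      (PySem.List.pyGetD terms i []) bit_len
        (acc1 ++ [0 :: cs.1]) ++ [cs.2 ++ [0]])
      acc
  (PySem.List.pyRange 0 (PySem.Int.mod (terms.length : Int) 3) 1).foldl
    (fun acc1 i => acc1 ++ [PySem.List.pyGetD terms (((terms.length : Int) - 1) - i) [] ++ [0]])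
    result

theorem csa_level_eq_go (terms : List (List Int)) (b : Int) :
    csa_level terms b = levelA_go terms b [] := rfl

theorem pyRange23 (m : Nat) :
    PySem.List.pyRange 2 (m : Int) 3 = (List.range (m / 3)).map (fun k : Nat => (2 : Int) + 3 * (k : Int)) := by
  rw [PySem.List.pyRange_of_pos 2 (m : Int) (by norm_num)]
  have h : (if (2 : Int) < (m : Int) then (((m : Int) - 2 + 3 - 1) / 3).toNat else 0) = m / 3 := by
    split_ifs with h <;> omega
  rw [h]

theorem pyRange23_succ (m : Nat) :
    PySem.List.pyRange 2 ((m + 3 : Nat) : Int) 3 =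
      2 :: (List.range (m / 3)).map (fun k : Nat => (5 : Int) + 3 * (k : Int)) := by
  rw [pyRange23 (m + 3)]
  have h3 : (m + 3) / 3 = m / 3 + 1 := by omega
  rw [h3, List.range_succ_eq_map, List.map_cons, List.map_map]
  congr 1
  norm_num
  intro a _
  ring

theorem pyGetD_shift3 {α : Type} (x y z : α) (l : List α) (n : Nat) (d : α) :
    PySem.List.pyGetD (x :: y :: z :: l) ((n : Int) + 3) d = PySem.List.pyGetD l (n : Int) d := by
  have h : ((n : Int) + 3) = ((n + 3 : Nat) : Int) := by push_cast; ring
  rw [h, PySem.List.pyGetD_natCast, PySem.List.pyGetD_natCast]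
  rfl

-- the level functions agree (A's index-driven fold = B's destructuring recursion)
theorem level_eq_fuel (n : Nat) :
    ∀ (terms : List (List Int)), terms.length ≤ n → ∀ (b : Int) (acc : List (List Int)),
      levelA_go terms b acc = levelB b terms acc := by
  induction n with
  | zero =>
    intro terms h b acc
    have : terms = [] := by cases terms <;> simp_all
    subst this
    simp [levelA_go, levelB, PySem.List.pyRange_of_pos 2 0 (by norm_num : (0:Int) < 3)]
  | succ n ih =>
    intro terms h b acc
    match terms with
    | [] =>
      simp [levelA_go, levelB, PySem.List.pyRange_of_pos 2 0 (by norm_num : (0:Int) < 3)]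
    | [a] =>
      simp [levelA_go, levelB, PySem.List.pyRange_of_pos 2 1 (by norm_num : (0:Int) < 3),
            PySem.List.pyRange_one, PySem.List.pyGetD_ofNat']
    | [a, b'] =>
      simp [levelA_go, levelB, PySem.List.pyRange_of_pos 2 2 (by norm_num : (0:Int) < 3),
            PySem.List.pyRange_one, PySem.List.pyGetD_ofNat', List.range_succ]
    | a :: b' :: c :: rest =>
      have hm : (a :: b' :: c :: rest).length = rest.length + 3 := by
        simp only [List.length_cons]
      have hrest : rest.length ≤ n := by
        have := h; simp only [List.length_cons] at this; omega
      have key : levelA_go (a :: b' :: c :: rest) b acc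
          = levelA_go rest b ((acc ++ [0 :: (csa a b' c b).1]) ++ [(csa a b' c b).2 ++ [0]]) := by
        unfold levelA_go
        rw [hm, pyRange23_succ rest.length, List.foldl_cons]
        simp only []
        rw [show ((2:Int) - 2) = 0 from by norm_num, show ((2:Int) - 1) = 1 from by norm_num]
        rw [show PySem.List.pyGetD (a :: b' :: c :: rest) (0 : Int) [] = a from
              PySem.List.pyGetD_ofNat' _ 0 _,
            show PySem.List.pyGetD (a :: b' :: c :: rest) (1 : Int) [] = b' from
              PySem.List.pyGetD_ofNat' _ 1 _,
            show PySem.List.pyGetD (a :: b' :: c :: rest) (2 : Int) [] = c from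
              PySem.List.pyGetD_ofNat' _ 2 _]
        rw [pyRange23 rest.length, List.foldl_map, List.foldl_map]
        have hmod : PySem.Int.mod ((rest.length + 3 : Nat) : Int) 3
            = PySem.Int.mod ((rest.length : Nat) : Int) 3 := by
          rw [PySem.Int.mod_eq_emod_of_pos (by norm_num : (0:Int) < 3),
              PySem.Int.mod_eq_emod_of_pos (by norm_num : (0:Int) < 3)]
          push_cast
          omega
        rw [hmod]
        have htri : ∀ (init : List (List Int)),
            (List.range (rest.length / 3)).foldl
              (fun acc1 (k : Nat) =>
                (acc1 ++ [0 :: (csa (PySem.List.pyGetD (a :: b' :: c :: rest) (((5:Int) + 3 * (k : Int)) - 2) [])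
                                    (PySem.List.pyGetD (a :: b' :: c :: rest) (((5:Int) + 3 * (k : Int)) - 1) [])
                                    (PySem.List.pyGetD (a :: b' :: c :: rest) ((5:Int) + 3 * (k : Int)) []) b).1]) ++
                  [(csa (PySem.List.pyGetD (a :: b' :: c :: rest) (((5:Int) + 3 * (k : Int)) - 2) [])
                        (PySem.List.pyGetD (a :: b' :: c :: rest) (((5:Int) + 3 * (k : Int)) - 1) [])
                        (PySem.List.pyGetD (a :: b' :: c :: rest) ((5:Int) + 3 * (k : Int)) []) b).2 ++ [0]]) init
            = (List.range (rest.length / 3)).foldl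
              (fun acc1 (k : Nat) =>
                (acc1 ++ [0 :: (csa (PySem.List.pyGetD rest (((2:Int) + 3 * (k : Int)) - 2) [])
                                    (PySem.List.pyGetD rest (((2:Int) + 3 * (k : Int)) - 1) [])
                                    (PySem.List.pyGetD rest ((2:Int) + 3 * (k : Int)) []) b).1]) ++
                  [(csa (PySem.List.pyGetD rest (((2:Int) + 3 * (k : Int)) - 2) [])
                        (PySem.List.pyGetD rest (((2:Int) + 3 * (k : Int)) - 1) [])
                        (PySem.List.pyGetD rest ((2:Int) + 3 * (k : Int)) []) b).2 ++ [0]]) init := by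
          intro init
          apply PySem.List.foldl_congr_mem
          intro acc1 k _
          have e0 : ((5:Int) + 3 * (k : Int)) - 2 = ((3 * k : Nat) : Int) + 3 := by push_cast; ring
          have e1 : ((5:Int) + 3 * (k : Int)) - 1 = ((3 * k + 1 : Nat) : Int) + 3 := by push_cast; ring
          have e2 : ((5:Int) + 3 * (k : Int)) = ((3 * k + 2 : Nat) : Int) + 3 := by push_cast; ring
          have f0 : ((2:Int) + 3 * (k : Int)) - 2 = ((3 * k : Nat) : Int) := by push_cast; ring
          have f1 : ((2:Int) + 3 * (k : Int)) - 1 = ((3 * k + 1 : Nat) : Int) := by push_cast; ring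
          have f2 : ((2:Int) + 3 * (k : Int)) = ((3 * k + 2 : Nat) : Int) := by push_cast; ring
          rw [e0, e1, e2, f0, f1, f2, pyGetD_shift3, pyGetD_shift3, pyGetD_shift3]
        rw [htri]
        apply PySem.List.foldl_congr_mem
        intro acc1 i hi
        rw [PySem.List.mem_pyRange_one] at hi
        have hml : PySem.Int.mod ((rest.length : Nat) : Int) 3 ≤ (rest.length : Int) := by
          rw [PySem.Int.mod_eq_emod_of_pos (by norm_num : (0:Int) < 3)]
          omega
        obtain ⟨j, hj⟩ : ∃ j : Nat, ((rest.length : Int) - 1) - i = (j : Int) :=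
          ⟨(((rest.length : Int) - 1) - i).toNat, by omega⟩
        have g1 : (((rest.length + 3 : Nat) : Int) - 1) - i = ((j : Nat) : Int) + 3 := by
          push_cast at hj ⊢; omega
        rw [g1, hj, pyGetD_shift3]
      rw [key, ih rest hrest b _]
      show levelB b rest _ = levelB b (a :: b' :: c :: rest) acc
      conv_rhs => rw [levelB]
      rw [csa_shift]

-- length of a fold that appends two elements per step
theorem foldl_append_two_length {α β : Type} (l : List α) (f g : α → β) (acc : List β) :
    (l.foldl (fun acc x => (acc ++ [f x]) ++ [g x]) acc).length = acc.length + 2 * l.length := by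
  induction l generalizing acc with
  | nil => simp
  | cons h t ih =>
    rw [List.foldl_cons, ih]
    simp [List.length_append]
    omega

theorem csa_level_length (terms : List (List Int)) (bit_len : Int) :
    (csa_level terms bit_len).length = 2 * (terms.length / 3) + terms.length % 3 := by
  unfold csa_level
  rw [PySem.List.foldl_append_singleton_eq_map]
  rw [List.length_append, foldl_append_two_length]
  rw [List.length_map, PySem.List.pyRange_of_pos _ _ (by norm_num : (0:Int) < 3)]
  rw [PySem.List.length_pyRange_one, PySem.Int.mod_eq_emod_of_pos (by norm_num : (0:Int) < 3)]
  simp only [List.length_map, List.length_range, List.length_nil]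
  split_ifs with h <;> omega

theorem go_eq_loop (fuel : Nat) :
    ∀ (terms : List (List Int)) (b : Int), 3 ≤ terms.length → terms.length ≤ fuel + 3 →
      compressor_tree_go (fuel + 1) terms b = tailB (loopB fuel terms b) := by
  induction fuel with
  | zero =>
    intro terms b h3 hle
    have h : terms.length = 3 := by omega
    simp [compressor_tree_go, loopB, h, ctBase_eq_tailB terms b h]
  | succ fuel ih =>
    intro terms b h3 hle
    by_cases h : terms.length = 3
    · simp [compressor_tree_go, loopB, h, ctBase_eq_tailB terms b h]
    · have hlvl : csa_level terms b = levelB b terms [] := by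
        rw [csa_level_eq_go]; exact level_eq_fuel terms.length terms le_rfl b []
      have hlen := csa_level_length terms b
      have h4 : 4 ≤ terms.length := by omega
      have h3' : 3 ≤ (csa_level terms b).length := by omega
      have hle' : (csa_level terms b).length ≤ fuel + 3 := by omega
      simp only [compressor_tree_go, loopB]
      rw [if_neg h, if_pos h, ← hlvl]
      exact ih (csa_level terms b) (b + 1) h3' hle'

-- ===== VERDICT =====
theorem compressor_tree_spec : Claim_equal_compressor_tree := by
  intro terms bit_len _hdom hpre
  unfold Spec_compressor_tree compressor_tree compressor_tree_alt
  exact go_eq_loop terms.length terms bit_len hpre.1 (by omega)
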